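-- pv_equiv track=rewrite | github.com/celer-network/sgn | test/e2e/multinode/mergelog.py | readnext
-- ===== SOURCE A (Python) =====
-- def readnext(lines, n):
--     if n > len(lines) - 1:
--         return "", n
--     line = lines[n]
--     if len(line) > 24 and line[1] != '[' and line[24] == '|':
--         return line, n+1
--     else:
--         return readnext(lines, n+1)
-- ===== SOURCE B (Python) =====
-- def readnext(lines, n):
--     if n > len(lines) - 1:
--         return "", n
--     for i in range(n, len(lines)):
--         line = lines[i]
--         if len(line) > 24 and line[1] != '[' and line[24] == '|':
--             return line, i + 1
--     return "", len(lines)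
-- ===== Notes on version B (the rewrite author's own statement) =====
-- stated objective: idiomatic
-- what changed: Replaces A's tail recursion on n with a single for-loop over range(n, len(lines)) plus a post-loop sentinel, avoiding Python recursion depth on long logs.
-- outside the precondition, e.g. on readnext(['a'], -3): A raises IndexError, B raises IndexError
import Mathlib
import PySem

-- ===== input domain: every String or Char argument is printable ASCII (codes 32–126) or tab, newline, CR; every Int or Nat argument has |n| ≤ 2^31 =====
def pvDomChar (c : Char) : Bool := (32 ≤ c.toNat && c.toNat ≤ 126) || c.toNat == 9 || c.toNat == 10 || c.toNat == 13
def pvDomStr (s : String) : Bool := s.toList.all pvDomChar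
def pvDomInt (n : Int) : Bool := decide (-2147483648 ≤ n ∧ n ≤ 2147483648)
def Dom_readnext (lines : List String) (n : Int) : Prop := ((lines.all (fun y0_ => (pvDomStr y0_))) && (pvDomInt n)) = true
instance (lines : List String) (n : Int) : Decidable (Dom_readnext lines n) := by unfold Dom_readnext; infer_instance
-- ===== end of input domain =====

-- B replaces A's tail recursion on n by a single bounded for-loop over range(n, len(lines)) with a
-- post-loop sentinel ("", len(lines)); objective: idiomatic (same exact behaviour, no deep recursion).

-- ===== PORT A =====
-- A's valid-line test: len(line) > 24 and line[1] != '[' and line[24] == '|'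
def readnextPredA (line : String) : Bool :=
  decide ((PySem.Str.len line) > 24) &&
    !(PySem.Str.pyGet? line 1 == some '[') &&
    (PySem.Str.pyGet? line 24 == some '|')

def readnext (lines : List String) (n : Int) : String × Int :=
  if (lines.length : Int) - 1 < n then ("", n)
  else
    match PySem.List.pyGet? lines n with
    | none => ("", n)   -- IndexError in Python (n < -len); excluded by Pre_readnext
    | some line =>
      if readnextPredA line then (line, n + 1)
      else readnext lines (n + 1)
termination_by ((lines.length : Int) - n).toNat
decreasing_by
  omega

-- ===== PORT B =====
-- B's loop body: first index i in the range whose line passes the test, with (line, i+1)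
def readnextScanB (lines : List String) : List Int → Option (String × Int)
  | [] => none
  | i :: rest =>
    match PySem.List.pyGet? lines i with
    | none => none   -- IndexError in Python; excluded by Pre_readnext
    | some line =>
      if decide ((PySem.Str.len line) > 24) &&
          !(PySem.Str.pyGet? line 1 == some '[') &&
          (PySem.Str.pyGet? line 24 == some '|')
      then some (line, i + 1)
      else readnextScanB lines rest

def readnext_alt (lines : List String) (n : Int) : String × Int :=
  if n > (lines.length : Int) - 1 then ("", n)
  else
    match readnextScanB lines (PySem.List.pyRange n lines.length 1) with
    | some r => r
    | none => ("", (lines.length : Int))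

-- ===== PRECONDITION & SPEC =====
-- Pre_ excludes exactly the inputs where A raises IndexError: n below -len(lines).
def Pre_readnext (lines : List String) (n : Int) : Prop := -(lines.length : Int) ≤ n
instance (lines : List String) (n : Int) : Decidable (Pre_readnext lines n) := by unfold Pre_readnext; infer_instance
def pvWitness_readnext : List String × Int := (["a", "b"], 0)
def Spec_readnext (lines : List String) (n : Int) (out : String × Int) : Prop := out = readnext_alt lines n
instance (lines : List String) (n : Int) (out : String × Int) : Decidable (Spec_readnext lines n out) := by unfold Spec_readnext; infer_instance

-- ===== CLAIM (what is proved, stated in full; the proofs are below) =====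
def Claim_equal_readnext : Prop := ∀ (lines : List String) (n : Int), Dom_readnext lines n → Pre_readnext lines n → Spec_readnext lines n (readnext lines n)

-- ===== LEMMAS AND PROOFS =====

-- A equals B's scan-with-sentinel on every in-range or exhausted index.
theorem readnext_eq_scan (lines : List String) :
    ∀ (k : Nat) (n : Int), -(lines.length : Int) ≤ n → n ≤ (lines.length : Int) →
      ((lines.length : Int) - n).toNat = k →
      readnext lines n =
        (match readnextScanB lines (PySem.List.pyRange n lines.length 1) with
         | some r => r
         | none => ("", (lines.length : Int))) := by
  intro k
  induction k with
  | zero =>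
    intro n hlo hhi hk
    have hn : n = (lines.length : Int) := by omega
    subst hn
    rw [PySem.List.pyRange_one_eq_nil (by omega)]
    rw [readnext, if_pos (by omega)]
    simp [readnextScanB]
  | succ k ih =>
    intro n hlo hhi hk
    have hlt : n < (lines.length : Int) := by omega
    have hget : ∃ line, PySem.List.pyGet? lines n = some line := by
      rcases h : PySem.List.pyGet? lines n with _ | line
      · rw [PySem.List.pyGet?_eq_none_iff] at h
        exact absurd ⟨hlo, hlt⟩ h
      · exact ⟨line, rfl⟩
    rcases hget with ⟨line, hline⟩
    rw [readnext, if_neg (by omega)]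
    rw [PySem.List.pyRange_one_cons hlt]
    simp only [hline, readnextScanB]
    rw [show (decide ((PySem.Str.len line) > 24) &&
        !(PySem.Str.pyGet? line 1 == some '[') &&
        (PySem.Str.pyGet? line 24 == some '|')) = readnextPredA line from rfl]
    split_ifs with hp
    · rfl
    · exact ih (n + 1) (by omega) (by omega) (by omega)

-- ===== VERDICT (by name: the statement is the Claim_ definition above) =====
theorem readnext_spec : Claim_equal_readnext := by
  intro lines n _ hpre
  unfold Spec_readnext readnext_alt
  by_cases hhi : n > (lines.length : Int) - 1
  · rw [readnext, if_pos (by omega), if_pos hhi]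
  · rw [if_neg hhi]
    exact readnext_eq_scan lines ((lines.length : Int) - n).toNat n hpre (by omega) rfl
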